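-- pv_equiv track=rewrite | github.com/shahen121/api | scraper.py | _is_ui_or_icon
-- ===== SOURCE A (Python) =====
-- def _is_ui_or_icon(url: str) -> bool:
--     bad = [
--         "_next/static",
--         "default-avatar",
--         "like.",
--         "love.",
--         "laugh.",
--         "wow.",
--         "cry.",
--         "angry.",
--         "emoji",
--         "icon",
--         "reaction",
--     ]
--     u = url.lower()
--     return any(x in u for x in bad)
-- ===== SOURCE B (Python) =====
-- _BAD = [
--     "_next/static",
--     "default-avatar",
--     "like.",
--     "love.",
--     "laugh.",
--     "wow.",
--     "cry.",
--     "angry.",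
--     "emoji",
--     "icon",
--     "reaction",
-- ]
--
--
-- def _is_ui_or_icon(url: str) -> bool:
--     # single left-to-right scan: at each position, try each pattern as a
--     # case-insensitive prefix of the remaining suffix (no full lowering pass)
--     n = len(url)
--     for i in range(n):
--         for p in _BAD:
--             if n - i >= len(p) and all(url[i + j].lower() == p[j] for j in range(len(p))):
--                 return True
--     return False
-- ===== Notes on version B (the rewrite author's own statement) =====
-- stated objective: alternative
-- what changed: Instead of lowering the whole url and running 11 sequential substring containment scans over it, B makes one left-to-right scan over the url and at each position tries each pattern as a case-insensitive prefix of the remaining suffix, lowering characters on the fly.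
import Mathlib
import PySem

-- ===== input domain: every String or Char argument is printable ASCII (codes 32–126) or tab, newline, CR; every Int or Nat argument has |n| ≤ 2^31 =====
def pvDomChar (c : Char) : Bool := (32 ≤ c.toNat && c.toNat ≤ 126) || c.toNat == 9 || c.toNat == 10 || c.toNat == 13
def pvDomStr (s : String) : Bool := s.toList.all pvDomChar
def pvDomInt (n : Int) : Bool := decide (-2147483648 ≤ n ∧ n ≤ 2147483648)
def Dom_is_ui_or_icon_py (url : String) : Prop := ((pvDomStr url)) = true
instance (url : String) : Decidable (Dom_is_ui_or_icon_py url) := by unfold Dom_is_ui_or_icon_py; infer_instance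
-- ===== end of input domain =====

-- B replaces "lower the whole url, then 11 sequential substring scans" by a single
-- left-to-right scan that tries each pattern as a case-insensitive prefix at each
-- position (objective: alternative traversal, no full lowering pass).

-- ===== PORT A =====
-- the literal `bad` list of A
def badA : List String :=
  ["_next/static", "default-avatar", "like.", "love.", "laugh.", "wow.",
   "cry.", "angry.", "emoji", "icon", "reaction"]

def is_ui_or_icon_py (url : String) : Bool :=
  let u := PySem.Str.lower url
  badA.any (fun x => PySem.Str.isIn x u)

-- ===== PORT B =====
-- B's pattern list as character lists (Source B iterates the patterns character-wise)
def badB : List (List Char) :=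
  ["_next/static".toList, "default-avatar".toList, "like.".toList, "love.".toList,
   "laugh.".toList, "wow.".toList, "cry.".toList, "angry.".toList,
   "emoji".toList, "icon".toList, "reaction".toList]

-- 'all(url[i+j].lower() == p[j] for j in range(len(p)))' together with the
-- length guard: does pattern p match case-insensitively at the head of s?
def matchHere : List Char → List Char → Bool
  | [], _ => true
  | _ :: _, [] => false
  | p :: ps, c :: cs => (PySem.Chars.lowerChar c == p) && matchHere ps cs

-- the outer 'for i in range(n)' loop of Source B, as a scan over suffixes
def scanB : List Char → Bool
  | [] => false
  | c :: cs => badB.any (fun p => matchHere p (c :: cs)) || scanB cs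

def is_ui_or_icon_py_alt (url : String) : Bool :=
  scanB url.toList

-- ===== PRECONDITION & SPEC =====
def Spec_is_ui_or_icon_py (url : String) (out : Bool) : Prop := out = is_ui_or_icon_py_alt url
instance (url : String) (out : Bool) : Decidable (Spec_is_ui_or_icon_py url out) := by unfold Spec_is_ui_or_icon_py; infer_instance

-- ===== CLAIM (what is proved, stated in full; the proofs are below) =====
def Claim_equal_is_ui_or_icon_py : Prop := ∀ (url : String), Dom_is_ui_or_icon_py url → Spec_is_ui_or_icon_py url (is_ui_or_icon_py url)

-- ===== LEMMAS AND PROOFS =====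

-- the two literal pattern lists carry the same strings
theorem badB_eq : badB = badA.map String.toList := by decide

-- matchHere p s is exactly "p is a prefix of the lowered s"
theorem matchHere_iff (p s : List Char) :
    matchHere p s = true ↔ p <+: PySem.Chars.lower s := by
  induction p generalizing s with
  | nil => simp [matchHere]
  | cons a ps ih =>
    cases s with
    | nil => simp [matchHere, PySem.Chars.lower]
    | cons c cs =>
      simp only [matchHere, Bool.and_eq_true, beq_iff_eq, ih cs,
        PySem.Chars.lower, List.map_cons, List.cons_prefix_cons]
      exact ⟨fun ⟨h1, h2⟩ => ⟨h1.symm, h2⟩, fun ⟨h1, h2⟩ => ⟨h1.symm, h2⟩⟩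

-- scanB s is exactly "some pattern occurs (as a prefix of some suffix) in the lowered s"
theorem scanB_iff (s : List Char) :
    scanB s = true ↔ ∃ p ∈ badB, ∃ j, p <+: List.drop j (PySem.Chars.lower s) := by
  induction s with
  | nil =>
    rw [show scanB [] = false from rfl]
    simp only [false_iff, Bool.false_eq_true]
    rintro ⟨p, hp, j, hpre⟩
    have hne : p ≠ [] := by
      revert hp; rw [badB_eq]; simp [badA]; rintro (h|h|h|h|h|h|h|h|h|h|h) <;> simp [h]
    simp [PySem.Chars.lower, List.prefix_nil] at hpre
    exact hne hpre
  | cons c cs ih =>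
    simp only [scanB, Bool.or_eq_true, List.any_eq_true, ih]
    constructor
    · rintro (⟨p, hp, hm⟩ | ⟨p, hp, j, hpre⟩)
      · exact ⟨p, hp, 0, by simpa using (matchHere_iff p (c :: cs)).1 hm⟩
      · exact ⟨p, hp, j + 1, by simpa [PySem.Chars.lower] using hpre⟩
    · rintro ⟨p, hp, j, hpre⟩
      cases j with
      | zero =>
        exact Or.inl ⟨p, hp, (matchHere_iff p (c :: cs)).2 (by simpa using hpre)⟩
      | succ j =>
        exact Or.inr ⟨p, hp, j, by simpa [PySem.Chars.lower] using hpre⟩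

-- ===== VERDICT (by name: the statement is the Claim_ definition above) =====
theorem is_ui_or_icon_py_spec : Claim_equal_is_ui_or_icon_py := by
  intro url _
  unfold Spec_is_ui_or_icon_py
  rw [Bool.eq_iff_iff]
  unfold is_ui_or_icon_py is_ui_or_icon_py_alt
  rw [scanB_iff]
  simp only [List.any_eq_true]
  constructor
  · rintro ⟨x, hx, hin⟩
    refine ⟨x.toList, by rw [badB_eq]; exact List.mem_map_of_mem hx, ?_⟩
    have := (PySem.Str.isIn_iff_infix x (PySem.Str.lower url)).1 hin
    rw [PySem.Str.toList_lower] at this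
    exact (PySem.Chars.exists_prefix_drop_iff_isIn _ _).2
      ((PySem.Chars.isIn_iff_infix _ _).2 this) |>.elim (fun j hj => ⟨j, hj⟩)
  · rintro ⟨p, hp, j, hpre⟩
    rw [badB_eq] at hp
    simp only [List.mem_map] at hp
    obtain ⟨x, hx, rfl⟩ := hp
    refine ⟨x, hx, ?_⟩
    rw [PySem.Str.isIn_iff_infix, PySem.Str.toList_lower]
    exact (PySem.Chars.isIn_iff_infix _ _).1
      ((PySem.Chars.exists_prefix_drop_iff_isIn _ _).1 ⟨j, hpre⟩)
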